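-- pv_equiv track=rewrite | github.com/iscumadalina/FP | src/lecture/live-coding/lecture_4.py | divide_conquer_better
-- ===== SOURCE A (Python) =====
-- def divide_conquer_better(data: list, left: int, right: int) -> int:
--     if left == right:
--         if data[left] > 0:
--             return data[left]
--         else:
--             return 1
--
--     m = (left + right) // 2
--     return divide_conquer_better(data, left, m) * divide_conquer_better(data, m + 1, right)
-- ===== SOURCE B (Python) =====
-- def divide_conquer_better(data: list, left: int, right: int) -> int:
--     product = 1
--     for i in range(left, right + 1):
--         v = data[i]
--         if v > 0:
--             product *= v
--     return product
-- ===== Notes on version B (the rewrite author's own statement) =====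
-- stated objective: simpler
-- what changed: Replaced the binary divide-and-conquer recursion with a single iterative left-to-right loop that multiplies an accumulator by each positive element of data[left..right].
import Mathlib
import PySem

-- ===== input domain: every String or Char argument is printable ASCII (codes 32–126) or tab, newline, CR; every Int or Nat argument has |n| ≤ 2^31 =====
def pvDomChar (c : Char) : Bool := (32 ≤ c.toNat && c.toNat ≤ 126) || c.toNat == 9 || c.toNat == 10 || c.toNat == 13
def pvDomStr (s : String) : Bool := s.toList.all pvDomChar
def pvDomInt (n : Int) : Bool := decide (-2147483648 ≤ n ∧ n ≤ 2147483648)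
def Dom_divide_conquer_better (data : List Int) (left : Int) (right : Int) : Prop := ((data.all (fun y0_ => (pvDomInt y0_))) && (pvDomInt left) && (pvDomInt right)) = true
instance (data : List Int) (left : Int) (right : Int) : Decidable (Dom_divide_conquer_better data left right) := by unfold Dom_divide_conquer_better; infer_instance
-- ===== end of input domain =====

-- B replaces A's binary divide-and-conquer recursion by a single iterative pass
-- multiplying an accumulator by each positive element of data[left..right] (objective: simpler).

-- midpoint bounds, needed for port A's termination
theorem pvMidBounds (l r : Int) (h : l < r) :
    l ≤ PySem.Int.floordiv (l + r) 2 ∧ PySem.Int.floordiv (l + r) 2 < r := by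
  constructor
  · rw [PySem.Int.le_floordiv_iff_mul_le (by norm_num)]; omega
  · rw [PySem.Int.floordiv_lt_iff_lt_mul (by norm_num)]; omega

-- ===== PORT A =====
-- literal port of A; the 'else 1' branch is only a totaliser for left > right,
-- where the Python recursion never terminates (outside Pre_).
def divide_conquer_better (data : List Int) (left : Int) (right : Int) : Int :=
  if left = right then
    if PySem.List.pyGetD data left 0 > 0 then PySem.List.pyGetD data left 0 else 1
  else if h : left < right then
    let m := PySem.Int.floordiv (left + right) 2
    divide_conquer_better data left m * divide_conquer_better data (m + 1) right
  else 1
termination_by (right - left).toNat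
decreasing_by
  · have := pvMidBounds left right h; omega
  · have := pvMidBounds left right h; omega

-- ===== PORT B =====
def divide_conquer_better_alt (data : List Int) (left : Int) (right : Int) : Int :=
  (PySem.List.pyRange left (right + 1) 1).foldl
    (fun product i =>
      let v := PySem.List.pyGetD data i 0
      if v > 0 then product * v else product) 1

-- ===== PRECONDITION & SPEC =====
-- Pre_ excludes inputs on which Python A does not return: left > right (infinite
-- recursion / RecursionError) and indices in [left, right] out of range (IndexError).
def Pre_divide_conquer_better (data : List Int) (left : Int) (right : Int) : Prop :=
  left ≤ right ∧ PySem.Raise.InRange data.length left ∧ PySem.Raise.InRange data.length right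
instance (data : List Int) (left : Int) (right : Int) : Decidable (Pre_divide_conquer_better data left right) := by unfold Pre_divide_conquer_better; infer_instance
def pvWitness_divide_conquer_better : List Int × Int × Int := ([2, -1, 3], 0, 2)

def Spec_divide_conquer_better (data : List Int) (left : Int) (right : Int) (out : Int) : Prop := out = divide_conquer_better_alt data left right
instance (data : List Int) (left : Int) (right : Int) (out : Int) : Decidable (Spec_divide_conquer_better data left right out) := by unfold Spec_divide_conquer_better; infer_instance

-- ===== CLAIM (what is proved, stated in full; the proofs are below) =====
def Claim_equal_divide_conquer_better : Prop := ∀ (data : List Int) (left : Int) (right : Int), Dom_divide_conquer_better data left right → Pre_divide_conquer_better data left right → Spec_divide_conquer_better data left right (divide_conquer_better data left right)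

-- ===== LEMMAS AND PROOFS =====

-- B's loop body as a named step function
def pvStep (data : List Int) : Int → Int → Int :=
  fun product i =>
    let v := PySem.List.pyGetD data i 0
    if v > 0 then product * v else product

theorem pvStep_mul (data : List Int) (acc i : Int) :
    pvStep data acc i = acc * pvStep data 1 i := by
  unfold pvStep
  by_cases h : PySem.List.pyGetD data i 0 > 0 <;> simp [h]

theorem pvFoldl_mul (data : List Int) (xs : List Int) (acc : Int) :
    xs.foldl (pvStep data) acc = acc * xs.foldl (pvStep data) 1 := by
  induction xs generalizing acc with
  | nil => simp
  | cons x xs ih =>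
    simp only [List.foldl_cons]
    rw [ih (pvStep data acc x), ih (pvStep data 1 x), pvStep_mul, mul_assoc]

theorem pvFoldl_split (data : List Int) (a b c : Int) (hab : a ≤ b) (hbc : b ≤ c) :
    (PySem.List.pyRange a c 1).foldl (pvStep data) 1 =
    (PySem.List.pyRange a b 1).foldl (pvStep data) 1 *
    (PySem.List.pyRange b c 1).foldl (pvStep data) 1 := by
  generalize hk : (b - a).toNat = k
  induction k generalizing a with
  | zero =>
    have hba : b = a := by omega
    subst hba
    rw [PySem.List.pyRange_one_eq_nil (le_refl b)]
    simp
  | succ k ih =>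
    have hab' : a < b := by omega
    rw [PySem.List.pyRange_one_cons (a := a) (b := c) (by omega),
        PySem.List.pyRange_one_cons (a := a) (b := b) (by omega)]
    simp only [List.foldl_cons]
    rw [pvFoldl_mul data _ (pvStep data 1 a), pvFoldl_mul data (PySem.List.pyRange (a+1) b 1) (pvStep data 1 a)]
    rw [ih (a + 1) (by omega) (by omega)]
    ring

theorem pvMain (n : Nat) : ∀ (data : List Int) (l r : Int), l ≤ r → (r - l).toNat = n →
    divide_conquer_better data l r = divide_conquer_better_alt data l r := by
  induction n using Nat.strong_induction_on with
  | _ n ih =>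
    intro data l r hlr hn
    by_cases heq : l = r
    · subst heq
      rw [divide_conquer_better, divide_conquer_better_alt]
      rw [show l + 1 = l + 1 by rfl, PySem.List.pyRange_one_cons (by omega),
          PySem.List.pyRange_one_eq_nil (le_refl (l + 1))]
      by_cases h : PySem.List.pyGetD data l 0 > 0 <;> simp [h]
    · have hlt : l < r := by omega
      obtain ⟨hm1, hm2⟩ := pvMidBounds l r hlt
      rw [divide_conquer_better]
      simp only [heq, if_false, hlt, dif_pos]
      set m := PySem.Int.floordiv (l + r) 2 with hm
      rw [ih (m - l).toNat (by omega) data l m (by omega) rfl,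
          ih (r - (m+1)).toNat (by omega) data (m+1) r (by omega) rfl]
      show divide_conquer_better_alt data l m * divide_conquer_better_alt data (m+1) r =
           divide_conquer_better_alt data l r
      unfold divide_conquer_better_alt
      rw [show (fun product i => let v := PySem.List.pyGetD data i 0;
            if v > 0 then product * v else product) = pvStep data from rfl]
      rw [pvFoldl_split data l (m + 1) (r + 1) (by omega) (by omega)]

-- ===== VERDICT (by name: the statement is the Claim_ definition above) =====
theorem divide_conquer_better_spec : Claim_equal_divide_conquer_better := by
  intro data left right _ hpre
  unfold Spec_divide_conquer_better
  exact pvMain (right - left).toNat data left right hpre.1 rfl
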